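-- pv_equiv track=rewrite | github.com/chu123122/cs61a | Project/cats/cats.py | time_per_word
-- ===== SOURCE A (Python) =====
-- def time_per_word(words, timestamps_per_player):
--     """Return two values: the list of words that the players are typing and
--     a list of lists that stores the durations it took each player to type each word.
--
--     Arguments:
--         words: a list of words, in the order they are typed.
--         TIMESTAMPS_PER_PLAYER: A list of lists of timestamps including the time
--                           the player started typing, followed by the time
--                           the player finished typing each word.
--
--
--     >>> p = [[75, 81, 84, 90, 92], [19, 29, 35, 36, 38]]
--     >>> words, times = time_per_word(['collar', 'plush', 'blush', 'repute'], p)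
--     >>> words
--     ['collar', 'plush', 'blush', 'repute']
--     >>> times
--     [[6, 3, 6, 2], [10, 6, 1, 2]]
--     """
--     # BEGIN PROBLEM 9
--     "*** YOUR CODE HERE ***"
--     def time_helper(check,list):
--         if len(list)<2:
--             return []
--         elif check>=len(list)-2:
--             return [list[check+1]-list[check]]
--         else:
--             return [list[check+1]-list[check]]+time_helper(check+1,list)
--     words_list=[time_helper(0,l) for l in timestamps_per_player]
--     return words,words_list
-- ===== SOURCE B (Python) =====
-- def time_per_word(words, timestamps_per_player):
--     times = [[t[i + 1] - t[i] for i in range(len(t) - 1)]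
--              for t in timestamps_per_player]
--     return words, times
-- ===== Notes on version B (the rewrite author's own statement) =====
-- stated objective: simpler
-- what changed: Replaces the index-carrying recursive helper with a flat comprehension over adjacent index pairs per player list.
import Mathlib
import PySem

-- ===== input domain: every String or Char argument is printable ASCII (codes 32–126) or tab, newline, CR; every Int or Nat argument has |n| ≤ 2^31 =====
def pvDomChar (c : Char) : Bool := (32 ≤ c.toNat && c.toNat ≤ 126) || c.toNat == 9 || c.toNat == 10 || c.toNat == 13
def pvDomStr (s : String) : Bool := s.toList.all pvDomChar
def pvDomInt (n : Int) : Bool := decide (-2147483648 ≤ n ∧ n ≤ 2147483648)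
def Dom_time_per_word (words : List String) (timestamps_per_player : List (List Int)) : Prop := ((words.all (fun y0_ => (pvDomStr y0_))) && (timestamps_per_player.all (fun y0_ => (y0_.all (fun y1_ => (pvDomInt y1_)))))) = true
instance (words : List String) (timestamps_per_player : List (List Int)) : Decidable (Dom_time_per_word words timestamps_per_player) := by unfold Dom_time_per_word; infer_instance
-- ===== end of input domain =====

-- B replaces A's recursive consecutive-difference helper with a per-list map over adjacent index pairs (simpler).


-- ===== PORT A =====
-- A's recursive helper time_helper(check, list); indices are the nonnegative in-range
-- positions Python accesses, ported with getD (never reached out of range under the guards).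
def timeHelperA (check : Nat) (l : List Int) : List Int :=
  if l.length < 2 then []
  else if l.length - 2 ≤ check then [l.getD (check + 1) 0 - l.getD check 0]
  else (l.getD (check + 1) 0 - l.getD check 0) :: timeHelperA (check + 1) l
termination_by l.length - check
decreasing_by omega

def time_per_word (words : List String) (timestamps_per_player : List (List Int)) : List String × List (List Int) :=
  (words, timestamps_per_player.map (fun l => timeHelperA 0 l))

-- ===== PORT B =====
def time_per_word_alt (words : List String) (timestamps_per_player : List (List Int)) : List String × List (List Int) :=
  (words, timestamps_per_player.map (fun t =>
    (List.range (t.length - 1)).map (fun i => t.getD (i + 1) 0 - t.getD i 0)))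

-- ===== PRECONDITION & SPEC =====
def Spec_time_per_word (words : List String) (timestamps_per_player : List (List Int)) (out : List String × List (List Int)) : Prop := out = time_per_word_alt words timestamps_per_player
instance (words : List String) (timestamps_per_player : List (List Int)) (out : List String × List (List Int)) : Decidable (Spec_time_per_word words timestamps_per_player out) := by unfold Spec_time_per_word; infer_instance

-- ===== CLAIM (what is proved, stated in full; the proofs are below) =====
def Claim_equal_time_per_word : Prop := ∀ (words : List String) (timestamps_per_player : List (List Int)), Dom_time_per_word words timestamps_per_player → Spec_time_per_word words timestamps_per_player (time_per_word words timestamps_per_player)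

-- ===== LEMMAS AND PROOFS =====

-- ===== VERDICT (by name: the statement is the Claim_ definition above) =====
theorem timeHelperA_eq (check : Nat) (l : List Int) (h : check + 2 ≤ l.length ∨ check = 0) :
    timeHelperA check l
      = (List.range' check (l.length - 1 - check)).map (fun i => l.getD (i + 1) 0 - l.getD i 0) := by
  induction check using timeHelperA.induct l with
  | case1 check hlt =>
    rw [timeHelperA]
    simp only [if_pos hlt]
    have : l.length - 1 - check = 0 := by omega
    simp [this]
  | case2 check hlt hle =>
    rw [timeHelperA]
    simp only [if_neg hlt, if_pos hle]
    have hc : check + 2 ≤ l.length := by omega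
    have : l.length - 1 - check = 1 := by omega
    simp [this]
  | case3 check hlt hle ih =>
    rw [timeHelperA]
    simp only [if_neg hlt, if_neg hle]
    have h1 : l.length - 1 - check = (l.length - 1 - (check + 1)) + 1 := by omega
    rw [ih (Or.inl (by omega)), h1, List.range'_succ, List.map_cons]

-- ===== VERDICT (by name: the statement is the Claim_ definition above) =====
theorem time_per_word_spec : Claim_equal_time_per_word := by
  intro words tpp _
  unfold Spec_time_per_word time_per_word time_per_word_alt
  have : ∀ l : List Int, timeHelperA 0 l
      = (List.range (l.length - 1)).map (fun i => l.getD (i + 1) 0 - l.getD i 0) := by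
    intro l
    rw [timeHelperA_eq 0 l (Or.inr rfl), List.range_eq_range']
    simp
  simp only [this]
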